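-- pv_equiv track=rewrite | github.com/RyoSpiralArchitect/ZOCR | zocr/consensus/runtime.py | _apply_column_continuity_prior
-- ===== SOURCE A (Python) =====
-- from typing import Any, Dict, List, Mapping, Optional, Sequence, Tuple, Union
--
-- def _apply_column_continuity_prior(
--     candidates_by_row: List[List[int]], tolerance: int = 5
-- ) -> List[List[int]]:
--     if not candidates_by_row:
--         return candidates_by_row
--     refined: List[List[int]] = []
--     prev: Optional[List[int]] = None
--     tol = max(1, int(tolerance))
--     for row in candidates_by_row:
--         base = sorted({int(v) for v in row})
--         if prev:
--             augmented = list(base)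
--             for anchor in prev:
--                 if all(abs(anchor - cur) > tol for cur in base):
--                     augmented.append(int(anchor))
--             base = sorted({int(v) for v in augmented})
--         refined.append(base)
--         prev = base
--     return refined
-- ===== SOURCE B (Python) =====
-- from bisect import bisect_left
-- from typing import List
--
--
-- def _apply_column_continuity_prior(
--     candidates_by_row: List[List[int]], tolerance: int = 5
-- ) -> List[List[int]]:
--     if not candidates_by_row:
--         return candidates_by_row
--     tol = max(1, int(tolerance))
--     refined: List[List[int]] = []
--     prev: List[int] = []
--     for row in candidates_by_row:
--         base = sorted(set(row))
--         if prev: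
--             extras = []
--             for anchor in prev:
--                 i = bisect_left(base, anchor)
--                 near = (i < len(base) and base[i] - anchor <= tol) or (
--                     i > 0 and anchor - base[i - 1] <= tol
--                 )
--                 if not near:
--                     extras.append(anchor)
--             base = _merge_sorted(base, extras)
--         refined.append(base)
--         prev = base
--     return refined
--
--
-- def _merge_sorted(xs: List[int], ys: List[int]) -> List[int]:
--     # merge two strictly increasing, disjoint sorted lists
--     out: List[int] = []
--     i = j = 0
--     while i < len(xs) and j < len(ys):
--         if xs[i] < ys[j]:
--             out.append(xs[i])
--             i += 1
--         else:
--             out.append(ys[j])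
--             j += 1
--     out.extend(xs[i:])
--     out.extend(ys[j:])
--     return out
-- ===== Notes on version B (the rewrite author's own statement) =====
-- stated objective: faster
-- what changed: B replaces A's inner all-pairs scan (every previous anchor against every current candidate) by a bisect_left binary search for the nearest neighbour in the sorted base, and replaces A's re-sort-and-dedup of the augmented row by a linear merge of the two sorted disjoint lists.
import Mathlib
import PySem

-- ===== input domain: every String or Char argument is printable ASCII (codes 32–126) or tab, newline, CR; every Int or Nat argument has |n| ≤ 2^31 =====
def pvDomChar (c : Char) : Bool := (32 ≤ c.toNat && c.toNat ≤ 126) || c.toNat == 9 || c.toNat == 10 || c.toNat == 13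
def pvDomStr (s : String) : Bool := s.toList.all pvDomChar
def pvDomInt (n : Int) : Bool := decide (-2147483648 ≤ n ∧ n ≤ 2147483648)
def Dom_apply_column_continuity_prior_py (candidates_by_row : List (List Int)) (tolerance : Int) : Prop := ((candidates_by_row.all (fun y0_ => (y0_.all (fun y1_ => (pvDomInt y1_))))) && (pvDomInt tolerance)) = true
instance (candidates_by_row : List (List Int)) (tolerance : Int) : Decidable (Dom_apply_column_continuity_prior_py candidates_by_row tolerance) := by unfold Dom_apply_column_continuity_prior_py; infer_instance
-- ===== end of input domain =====

-- B replaces A's inner all-pairs isolation scan by a bisect (binary search) nearest-neighbour test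
-- on the sorted base and replaces the final sort-and-dedup by a linear merge of two sorted lists
-- (objective: faster).

-- ===== PORT A =====
-- one loop iteration of A: state = (refined, prev)
def pvStepA (tol : Int) (st : List (List Int) × Option (List Int)) (row : List Int) :
    List (List Int) × Option (List Int) :=
  let base0 := PySem.List.sorted (PySem.Set.ofList row) (fun v => v) false
  let base :=
    if (match st.2 with | none => false | some l => !l.isEmpty) then
      let augmented := base0 ++ (st.2.getD []).filter
        (fun anchor => base0.all fun cur => decide (tol < |anchor - cur|))
      PySem.List.sorted (PySem.Set.ofList augmented) (fun v => v) false
    else base0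
  (st.1 ++ [base], some base)

def apply_column_continuity_prior_py (candidates_by_row : List (List Int)) (tolerance : Int) : List (List Int) :=
  if candidates_by_row.isEmpty then candidates_by_row
  else
    let tol := max 1 tolerance
    (candidates_by_row.foldl (pvStepA tol) ([], none)).1

-- ===== PORT B =====
-- bisect_left is PySem.List.bisectLeft (stdlib call in Source B)
def pvNearB (base : List Int) (anchor tol : Int) : Bool :=
  let i := PySem.List.bisectLeft base anchor
  (decide (i < base.length) && decide (base.getD i 0 - anchor ≤ tol))
  || (decide (0 < i) && decide (anchor - base.getD (i - 1) 0 ≤ tol))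

-- Source B's _merge_sorted: merge two sorted lists front to back
def pvMergeSorted : List Int → List Int → List Int
  | [], ys => ys
  | x :: xs, [] => x :: xs
  | x :: xs, y :: ys =>
    if x < y then x :: pvMergeSorted xs (y :: ys) else y :: pvMergeSorted (x :: xs) ys
termination_by xs ys => xs.length + ys.length

-- one loop iteration of B: state = (refined, prev)
def pvStepB (tol : Int) (st : List (List Int) × List Int) (row : List Int) :
    List (List Int) × List Int :=
  let base0 := PySem.List.sorted (PySem.Set.ofList row) (fun v => v) false
  let base :=
    if st.2.isEmpty then base0
    else pvMergeSorted base0 (st.2.filter (fun anchor => !pvNearB base0 anchor tol))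
  (st.1 ++ [base], base)

def apply_column_continuity_prior_py_alt (candidates_by_row : List (List Int)) (tolerance : Int) : List (List Int) :=
  if candidates_by_row.isEmpty then candidates_by_row
  else
    let tol := max 1 tolerance
    (candidates_by_row.foldl (pvStepB tol) ([], [])).1

-- ===== PRECONDITION & SPEC =====
def Spec_apply_column_continuity_prior_py (candidates_by_row : List (List Int)) (tolerance : Int) (out : List (List Int)) : Prop := out = apply_column_continuity_prior_py_alt candidates_by_row tolerance
instance (candidates_by_row : List (List Int)) (tolerance : Int) (out : List (List Int)) : Decidable (Spec_apply_column_continuity_prior_py candidates_by_row tolerance out) := by unfold Spec_apply_column_continuity_prior_py; infer_instance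

-- ===== CLAIM (what is proved, stated in full; the proofs are below) =====
def Claim_equal_apply_column_continuity_prior_py : Prop := ∀ (candidates_by_row : List (List Int)) (tolerance : Int), Dom_apply_column_continuity_prior_py candidates_by_row tolerance → Spec_apply_column_continuity_prior_py candidates_by_row tolerance (apply_column_continuity_prior_py candidates_by_row tolerance)

-- ===== LEMMAS AND PROOFS =====

-- the bisect-based nearest-neighbour test equals "some element of base is within tol", on a sorted base
lemma pvNearB_iff (base : List Int) (hb : base.Pairwise (· ≤ ·)) (a tol : Int) :
    pvNearB base a tol = true ↔ ∃ cur ∈ base, |a - cur| ≤ tol := by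
  obtain ⟨hlen, hlt, hge⟩ := PySem.List.bisectLeft_spec base a hb
  simp only [pvNearB, Bool.or_eq_true, Bool.and_eq_true, decide_eq_true_eq]
  constructor
  · rintro (⟨h1, h2⟩ | ⟨h1, h2⟩)
    · refine ⟨base[PySem.List.bisectLeft base a], List.getElem_mem _, ?_⟩
      have hle := hge (PySem.List.bisectLeft base a) h1 le_rfl
      rw [List.getD_eq_getElem _ _ h1] at h2
      have habs : |a - base[PySem.List.bisectLeft base a]| =
          base[PySem.List.bisectLeft base a] - a := by
        rw [abs_sub_comm]; exact abs_of_nonneg (by omega)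
      omega
    · have hj : PySem.List.bisectLeft base a - 1 < base.length := by omega
      refine ⟨base[PySem.List.bisectLeft base a - 1], List.getElem_mem _, ?_⟩
      have hltj := hlt (PySem.List.bisectLeft base a - 1) hj (by omega)
      rw [List.getD_eq_getElem _ _ hj] at h2
      have habs : |a - base[PySem.List.bisectLeft base a - 1]| =
          a - base[PySem.List.bisectLeft base a - 1] := abs_of_nonneg (by omega)
      omega
  · rintro ⟨cur, hmem, hd⟩
    obtain ⟨j, hj, rfl⟩ := List.mem_iff_getElem.mp hmem
    by_cases hji : j < PySem.List.bisectLeft base a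
    · right
      have h0i : 0 < PySem.List.bisectLeft base a := by omega
      have hjlt : base[j] < a := hlt j hj hji
      have hmono : base[j] ≤ base[PySem.List.bisectLeft base a - 1] := by
        rcases Nat.lt_or_ge j (PySem.List.bisectLeft base a - 1) with h | h
        · exact List.pairwise_iff_getElem.mp hb j _ hj (by omega) h
        · have : j = PySem.List.bisectLeft base a - 1 := by omega
          simp [this]
      rw [List.getD_eq_getElem _ _ (show PySem.List.bisectLeft base a - 1 < base.length by omega)]
      have habs : |a - base[j]| = a - base[j] := abs_of_nonneg (by omega)
      exact ⟨h0i, by omega⟩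
    · left
      have hilen : PySem.List.bisectLeft base a < base.length := by omega
      have hia : a ≤ base[PySem.List.bisectLeft base a] := hge _ hilen le_rfl
      have hmono : base[PySem.List.bisectLeft base a] ≤ base[j] := by
        rcases Nat.lt_or_ge (PySem.List.bisectLeft base a) j with h | h
        · exact List.pairwise_iff_getElem.mp hb _ j hilen hj h
        · have : PySem.List.bisectLeft base a = j := by omega
          simp [this]
      rw [List.getD_eq_getElem _ _ hilen]
      have habs : |a - base[j]| = base[j] - a := by
        rw [abs_sub_comm]; exact abs_of_nonneg (by omega)
      exact ⟨hilen, by omega⟩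

-- hence B's filter predicate agrees with A's
lemma pvFilter_eq (base : List Int) (hb : base.Pairwise (· ≤ ·)) (tol : Int) (a : Int) :
    (!pvNearB base a tol) = (base.all fun cur => decide (tol < |a - cur|)) := by
  cases h : pvNearB base a tol
  · have hno := (not_iff_not.mpr (pvNearB_iff base hb a tol)).mp (by simp [h])
    push Not at hno
    simp only [Bool.not_false]
    symm; rw [List.all_eq_true]
    intro cur hcur
    exact decide_eq_true (by have := hno cur hcur; omega)
  · obtain ⟨cur, hmem, hd⟩ := (pvNearB_iff base hb a tol).mp h
    simp only [Bool.not_true]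
    symm; rw [List.all_eq_false]
    exact ⟨cur, hmem, by simp; omega⟩

lemma pvMergeSorted_perm (xs ys : List Int) : (pvMergeSorted xs ys).Perm (xs ++ ys) := by
  fun_induction pvMergeSorted xs ys with
  | case1 ys => simp
  | case2 x xs => simp
  | case3 x xs y ys h ih => simpa using ih.cons x
  | case4 x xs y ys h ih => exact (ih.cons y).trans List.perm_middle.symm

lemma pvMergeSorted_pairwise (xs ys : List Int) (hx : xs.Pairwise (· < ·))
    (hy : ys.Pairwise (· < ·)) (hne : ∀ a ∈ xs, ∀ b ∈ ys, a ≠ b) :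
    (pvMergeSorted xs ys).Pairwise (· < ·) := by
  revert hx hy hne
  fun_induction pvMergeSorted xs ys with
  | case1 ys => intro _ hy _; exact hy
  | case2 x xs => intro hx _ _; exact hx
  | case3 x xs y ys h ih =>
    intro hx hy hne
    rw [List.pairwise_cons]
    refine ⟨?_, ih hx.of_cons hy (fun a ha b hb => hne a (List.mem_cons_of_mem _ ha) b hb)⟩
    intro z hz
    rcases List.mem_append.mp ((pvMergeSorted_perm xs (y :: ys)).mem_iff.mp hz) with hz | hz
    · exact (List.pairwise_cons.mp hx).1 z (by simpa using hz)
    · rcases List.mem_cons.mp hz with rfl | hz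
      · exact h
      · exact h.trans ((List.pairwise_cons.mp hy).1 z hz)
  | case4 x xs y ys h ih =>
    intro hx hy hne
    have hyx : y < x := lt_of_le_of_ne (not_lt.mp h) (Ne.symm (hne x List.mem_cons_self y List.mem_cons_self))
    rw [List.pairwise_cons]
    refine ⟨?_, ih hx hy.of_cons (fun a ha b hb => hne a ha b (List.mem_cons_of_mem _ hb))⟩
    intro z hz
    rcases List.mem_append.mp ((pvMergeSorted_perm (x :: xs) ys).mem_iff.mp hz) with hz | hz
    · rcases List.mem_cons.mp hz with rfl | hz
      · exact hyx
      · exact hyx.trans ((List.pairwise_cons.mp hx).1 z hz)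
    · exact (List.pairwise_cons.mp hy).1 z hz

-- A's sort-dedup of base ++ isolated-anchors equals B's merge, for sorted prev
lemma pvStep_base_eq (base0 prev : List Int) (tol : Int) (h0 : base0.Pairwise (· < ·))
    (hp : prev.Pairwise (· < ·)) (htol : 0 ≤ tol) :
    PySem.List.sorted (PySem.Set.ofList (base0 ++ prev.filter
        (fun anchor => base0.all fun cur => decide (tol < |anchor - cur|)))) (fun v => v) false
      = pvMergeSorted base0 (prev.filter (fun anchor => !pvNearB base0 anchor tol)) := by
  have hfe : prev.filter (fun anchor => !pvNearB base0 anchor tol)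
      = prev.filter (fun anchor => base0.all fun cur => decide (tol < |anchor - cur|)) :=
    List.filter_congr (fun a _ => pvFilter_eq base0 (h0.imp le_of_lt) tol a)
  rw [hfe]
  have hex : (prev.filter (fun anchor => base0.all fun cur => decide (tol < |anchor - cur|))).Pairwise (· < ·) :=
    hp.filter _
  have hdis : ∀ a ∈ base0, ∀ b ∈ prev.filter (fun anchor => base0.all fun cur => decide (tol < |anchor - cur|)), a ≠ b := by
    intro a ha b hb
    have hall := (List.mem_filter.mp hb).2
    rw [List.all_eq_true] at hall
    have := hall a ha
    simp only [decide_eq_true_eq] at this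
    intro heq
    subst heq
    simp at this
    omega
  have hnodup : (base0 ++ prev.filter (fun anchor => base0.all fun cur => decide (tol < |anchor - cur|))).Nodup :=
    List.nodup_append.mpr ⟨h0.imp ne_of_lt, hex.imp ne_of_lt, hdis⟩
  rw [PySem.Set.ofList_eq_self_of_nodup _ hnodup]
  exact PySem.List.sorted_eq_of_perm_of_pairwise_lt _ _ _
    (pvMergeSorted_perm _ _)
    (pvMergeSorted_pairwise _ _ h0 hex hdis)

lemma pvFold_eq (tol : Int) (htol : 0 ≤ tol) :
    ∀ (rows : List (List Int)) (acc : List (List Int)) (prevA : Option (List Int)) (prevB : List Int),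
      (prevA = none ∧ prevB = [] ∨ prevA = some prevB) → prevB.Pairwise (· < ·) →
      (rows.foldl (pvStepA tol) (acc, prevA)).1 = (rows.foldl (pvStepB tol) (acc, prevB)).1 := by
  intro rows
  induction rows with
  | nil => intro acc prevA prevB _ _; rfl
  | cons row rows ih =>
    intro acc prevA prevB hrel hp
    simp only [List.foldl_cons]
    have hb0 : (PySem.List.sorted (PySem.Set.ofList row) (fun v => v) false).Pairwise (· < ·) :=
      PySem.List.sorted_ofList_pairwise_lt row
    rcases hrel with ⟨hA, hB⟩ | hA
    · subst hA; subst hB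
      simp only [pvStepA, pvStepB, List.isEmpty_nil, if_true, Bool.false_eq_true, if_false]
      exact ih _ _ _ (Or.inr rfl) hb0
    · subst hA
      by_cases hpe : prevB = []
      · subst hpe
        simp only [pvStepA, pvStepB, List.isEmpty_nil, if_true, Bool.not_true,
          Bool.false_eq_true, if_false]
        exact ih _ _ _ (Or.inr rfl) hb0
      · obtain ⟨p, ps, rfl⟩ : ∃ p ps, prevB = p :: ps := by
          cases prevB with
          | nil => exact absurd rfl hpe
          | cons p ps => exact ⟨p, ps, rfl⟩
        have hbase := pvStep_base_eq (PySem.List.sorted (PySem.Set.ofList row) (fun v => v) false)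
          (p :: ps) tol hb0 hp htol
        simp only [pvStepA, pvStepB, List.isEmpty_cons, Bool.not_false, if_true,
          Option.getD_some, Bool.false_eq_true, if_false]
        rw [hbase]
        refine ih _ _ _ (Or.inr rfl) ?_
        rw [← hbase]
        exact PySem.List.sorted_ofList_pairwise_lt _

-- ===== VERDICT (by name: the statement is the Claim_ definition above) =====
theorem apply_column_continuity_prior_py_spec : Claim_equal_apply_column_continuity_prior_py := by
  intro cbr tolerance _
  unfold Spec_apply_column_continuity_prior_py
  unfold apply_column_continuity_prior_py apply_column_continuity_prior_py_alt
  by_cases h : cbr.isEmpty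
  · simp [h]
  · simp only [h]
    exact pvFold_eq (max 1 tolerance) (by omega) cbr [] none [] (Or.inl ⟨rfl, rfl⟩) (by simp)
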